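-- pv_equiv track=rewrite | github.com/amir-zeldes/RFTokenizer | rftokenizer/tokenize_rf.py | make_prev_next
-- ===== SOURCE A (Python) =====
-- def make_prev_next(seg_table):
-- 	"""
-- 	Function to make two column table into a four column table with prev/next seg
-- 	:param seg_table: Input table of form:
--
-- 			They	They
-- 			don't	do|n't
-- 			know	know
--
-- 	:return: Four column table with prev/next group context columns:
--
-- 			_       don't   They    They
-- 			They    know    don't   do|n't
-- 			don't	_       know	know
-- 	"""
--
-- 	prev_group = "_"
-- 	segs = [tuple(i.split('\t')) for i in seg_table]
-- 	out_segs = []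
-- 	for i, line in enumerate(segs):
-- 		current_group, segmentation = line
-- 		if i < len(seg_table) - 1:
-- 			next_group = segs[i+1][0]
-- 		else:
-- 			next_group = "_"  # Last group in data
-- 		if i > 0:
-- 			prev_group = segs[i-1][0]
-- 		out_segs.append("\t".join([prev_group, next_group, current_group, segmentation]))
--
-- 	return out_segs
-- ===== SOURCE B (Python) =====
-- def make_prev_next(seg_table):
--     cols = [tuple(line.split('\t')) for line in seg_table]
--     groups = [g for g, s in cols]
--     segmentations = [s for g, s in cols]
--     prevs = ["_"] + groups[:-1]
--     nexts = groups[1:] + ["_"]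
--     return ["\t".join(row) for row in zip(prevs, nexts, groups, segmentations)]
-- ===== Notes on version B (the rewrite author's own statement) =====
-- stated objective: alternative
-- what changed: B builds whole columns (groups, segmentations, a shifted prev column '_'+groups[:-1] and next column groups[1:]+'_') and zips them into rows, instead of A's indexed loop with i>0 / i<len-1 guards and per-row segs[i-1]/segs[i+1] lookups.
import Mathlib
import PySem

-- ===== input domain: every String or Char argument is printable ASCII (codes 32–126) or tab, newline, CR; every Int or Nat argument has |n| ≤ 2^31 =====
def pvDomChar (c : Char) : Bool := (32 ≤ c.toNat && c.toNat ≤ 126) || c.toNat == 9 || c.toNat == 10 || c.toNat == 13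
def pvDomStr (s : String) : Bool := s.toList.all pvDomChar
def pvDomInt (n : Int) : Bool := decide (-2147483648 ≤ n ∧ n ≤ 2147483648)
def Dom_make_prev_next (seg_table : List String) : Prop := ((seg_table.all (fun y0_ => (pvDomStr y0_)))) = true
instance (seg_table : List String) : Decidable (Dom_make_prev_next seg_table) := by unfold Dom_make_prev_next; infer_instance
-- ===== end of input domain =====

-- B replaces A's indexed loop (i>0 / i<len-1 guards with segs[i-1]/segs[i+1] lookups)
-- by whole shifted prev/next columns zipped into rows; alternative decomposition, same cost.


-- ===== PORT A =====
-- line.split('\t'): the separator is non-empty, so Python never raises here; split? is some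
def pvSplitTab (line : String) : List String := (PySem.Str.split? line "\t").getD []

-- loop body of A's 'for i, line in enumerate(segs)'; the tuple unpack
-- 'current_group, segmentation = line' is ported with getD 0/getD 1 (exact under Pre_,
-- where every line has exactly two fields; the index lookups segs[i±1] are guarded in range)
def mpnStep (segs : List (List String)) (n : Int) (st : String × List String)
    (p : Int × List String) : String × List String :=
  let prev_group := st.1
  let current_group := p.2.getD 0 ""
  let segmentation := p.2.getD 1 ""
  let next_group := if p.1 < n - 1 then (segs.getD (p.1 + 1).toNat []).getD 0 "" else "_"
  let prev_group := if p.1 > 0 then (segs.getD (p.1 - 1).toNat []).getD 0 "" else prev_group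
  (prev_group, st.2 ++ [PySem.Str.join "\t" [prev_group, next_group, current_group, segmentation]])

def make_prev_next (seg_table : List String) : List String :=
  let segs := seg_table.map pvSplitTab
  ((PySem.List.enumerate segs 0).foldl (mpnStep segs (Int.ofNat seg_table.length)) ("_", [])).2

-- ===== PORT B =====
def make_prev_next_alt (seg_table : List String) : List String :=
  let cols := seg_table.map pvSplitTab
  let groups := cols.map (fun c => c.getD 0 "")
  let segmentations := cols.map (fun c => c.getD 1 "")
  let prevs := ["_"] ++ groups.dropLast
  let nexts := groups.drop 1 ++ ["_"]
  (prevs.zip (nexts.zip (groups.zip segmentations))).map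
    (fun r => PySem.Str.join "\t" [r.1, r.2.1, r.2.2.1, r.2.2.2])

-- ===== PRECONDITION & SPEC =====
-- Pre_ excludes exactly the inputs where the Python raises ValueError: a line whose
-- split('\t') does not have exactly two fields makes the two-target unpack fail in A and in B.
def Pre_make_prev_next (seg_table : List String) : Prop :=
  ∀ line ∈ seg_table, (pvSplitTab line).length = 2
instance (seg_table : List String) : Decidable (Pre_make_prev_next seg_table) := by
  unfold Pre_make_prev_next; infer_instance

def pvWitness_make_prev_next : List String := ["They\tThey", "don't\tdo|n't", "know\tknow"]

def Spec_make_prev_next (seg_table : List String) (out : List String) : Prop := out = make_prev_next_alt seg_table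
instance (seg_table : List String) (out : List String) : Decidable (Spec_make_prev_next seg_table out) := by unfold Spec_make_prev_next; infer_instance

-- ===== CLAIM (what is proved, stated in full; the proofs are below) =====
def Claim_equal_make_prev_next : Prop := ∀ (seg_table : List String), Dom_make_prev_next seg_table → Pre_make_prev_next seg_table → Spec_make_prev_next seg_table (make_prev_next seg_table)

-- ===== LEMMAS AND PROOFS =====

-- reference form: rows produced left to right, threading the previous group
def pvNext : List (List String) → String
  | [] => "_"
  | d :: _ => d.getD 0 ""

def pvRows (prev : String) : List (List String) → List String
  | [] => []
  | c :: rest =>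
    PySem.Str.join "\t" [prev, pvNext rest, c.getD 0 "", c.getD 1 ""] :: pvRows (c.getD 0 "") rest

theorem mpn_loop (segs : List (List String)) :
    ∀ (l : List (List String)) (k : Nat), segs.drop k = l → ∀ (st : String × List String),
    ((PySem.List.enumerate l (k : Int)).foldl (mpnStep segs (Int.ofNat segs.length)) st).2
      = st.2 ++ pvRows (if k = 0 then st.1 else (segs.getD (k - 1) []).getD 0 "") l := by
  intro l
  induction l with
  | nil =>
    intro k hk st
    rw [PySem.List.enumerate_nil, List.foldl_nil]
    simp only [pvRows, List.append_nil]
  | cons c rest ih =>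
    intro k hk st
    have hk1 : segs.drop (k + 1) = rest := by
      have h : segs.drop (k + 1) = (segs.drop k).drop 1 := by rw [List.drop_drop]
      rw [h, hk, List.drop_one, List.tail_cons]
    have hkc : segs[k]? = some c := by
      have : (segs.drop k)[0]? = some c := by simp [hk]
      simpa [List.getElem?_drop] using this
    have hlen : segs.length = k + 1 + rest.length := by
      have h1 : (segs.drop k).length = segs.length - k := by simp
      have h2 : k ≤ segs.length := by
        by_contra h
        have : segs.drop k = [] := List.drop_eq_nil_of_le (by omega)
        rw [hk] at this; simp at this
      rw [hk] at h1; simp at h1; omega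
    rw [PySem.List.enumerate_cons, List.foldl_cons]
    have hstep : mpnStep segs (Int.ofNat segs.length) st ((k : Int), c)
        = ((if k = 0 then st.1 else (segs.getD (k - 1) []).getD 0 ""),
           st.2 ++ [PySem.Str.join "\t" [(if k = 0 then st.1 else (segs.getD (k - 1) []).getD 0 ""),
             pvNext rest, c.getD 0 "", c.getD 1 ""]]) := by
      unfold mpnStep
      have hprev : (if ((k : Int), c).1 > 0 then (segs.getD (((k : Int), c).1 - 1).toNat []).getD 0 "" else st.1)
          = if k = 0 then st.1 else (segs.getD (k - 1) []).getD 0 "" := by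
        by_cases h0 : k = 0
        · simp [h0]
        · have hc : ((k : Int) - 1).toNat = k - 1 := by omega
          simp only []
          rw [if_pos (by omega), if_neg h0, hc]
      have hnext : (if ((k : Int), c).1 < Int.ofNat segs.length - 1
              then (segs.getD (((k : Int), c).1 + 1).toNat []).getD 0 "" else "_")
          = pvNext rest := by
        cases rest with
        | nil =>
          simp only []
          rw [if_neg (by simp only [Int.ofNat_eq_natCast, hlen, List.length_nil]; push_cast; omega)]
          rfl
        | cons d rest' =>
          have hd : segs[k + 1]? = some d := by
            have : (segs.drop k)[1]? = some d := by simp [hk]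
            simpa [List.getElem?_drop] using this
          have ht : ((k : Int) + 1).toNat = k + 1 := by
            rw [show ((k : Int) + 1) = ((k + 1 : Nat) : Int) by push_cast; ring, Int.toNat_natCast]
          simp only []
          rw [if_pos (by simp only [Int.ofNat_eq_natCast, hlen, List.length_cons]; push_cast; omega), ht]
          simp [pvNext, List.getD, hd]
      simp only [hprev, hnext]
    rw [hstep]
    have hcast : ((k : Int) + 1) = ((k + 1 : Nat) : Int) := by push_cast; ring
    rw [hcast, ih (k + 1) hk1]
    simp [pvRows, List.getD, hkc]

theorem portA_eq_pvRows (seg_table : List String) :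
    make_prev_next seg_table = pvRows "_" (seg_table.map pvSplitTab) := by
  unfold make_prev_next
  have hlen : Int.ofNat seg_table.length = Int.ofNat (seg_table.map pvSplitTab).length := by simp
  rw [hlen]
  have := mpn_loop (seg_table.map pvSplitTab) (seg_table.map pvSplitTab) 0 (by simp) ("_", [])
  simpa using this

theorem portB_eq_pvRows (cols : List (List String)) (prev : String) :
    (((prev :: (cols.map (fun c => c.getD 0 "")).dropLast).zip
        (((cols.map (fun c => c.getD 0 "")).drop 1 ++ ["_"]).zip
          ((cols.map (fun c => c.getD 0 "")).zip (cols.map (fun c => c.getD 1 ""))))).map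
      (fun r => PySem.Str.join "\t" [r.1, r.2.1, r.2.2.1, r.2.2.2]))
      = pvRows prev cols := by
  induction cols generalizing prev with
  | nil => simp [pvRows]
  | cons c rest ih =>
    cases rest with
    | nil => simp [pvRows, pvNext]
    | cons d rest' =>
      simp only [List.map_cons, List.drop_succ_cons, List.drop_zero, List.dropLast,
        List.zip_cons_cons, pvRows, pvNext, List.cons_append, List.cons.injEq, true_and]
      exact ih (c.getD 0 "")

-- ===== VERDICT (by name: the statement is the Claim_ definition above) =====
theorem make_prev_next_spec : Claim_equal_make_prev_next := by
  intro seg_table _ _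
  show make_prev_next seg_table = make_prev_next_alt seg_table
  rw [portA_eq_pvRows]
  exact (portB_eq_pvRows (seg_table.map pvSplitTab) "_").symm
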